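-- pv_equiv track=rewrite | github.com/bernvaughn/PHY399_robotics | wwaldo/wwaldo.py | getMoment
-- ===== SOURCE A (Python) =====
-- def getMoment(image,a,b):
--     '''In: image as 2-dimensional list of grey values
--     In: a as x^a
--     In: b as y^b
--     Out: moment where sum of all the pixels with x^a and y^b
--     '''
--     #values = []
--     result = 0
--     for yi in range(len(image)):
--         thisLine = []
--         for xi in range(len(image[0])):
--             thisVal = ((yi**b)+(xi**a))
--             if thisVal > 0:
--                 result += thisVal
--             #thisLine.append(thisVal)
--         #values.append(thisLine)
--     return result
-- ===== SOURCE B (Python) =====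
-- def getMoment(image, a, b):
--     h = len(image)
--     w = len(image[0]) if image else 0
--     if h == 0 or w == 0:
--         return 0
--     return w * sum(y**b for y in range(h)) + h * sum(x**a for x in range(w))
-- ===== Notes on version B (the rewrite author's own statement) =====
-- stated objective: faster
-- what changed: Replaces the H*W double loop (the grey values are never used, only the coordinate grid) by two separate coordinate sums combined in closed form: W*sum(y^b)+H*sum(x^a), which equals A's positive-terms-only sum because every term is nonnegative.
import Mathlib
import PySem

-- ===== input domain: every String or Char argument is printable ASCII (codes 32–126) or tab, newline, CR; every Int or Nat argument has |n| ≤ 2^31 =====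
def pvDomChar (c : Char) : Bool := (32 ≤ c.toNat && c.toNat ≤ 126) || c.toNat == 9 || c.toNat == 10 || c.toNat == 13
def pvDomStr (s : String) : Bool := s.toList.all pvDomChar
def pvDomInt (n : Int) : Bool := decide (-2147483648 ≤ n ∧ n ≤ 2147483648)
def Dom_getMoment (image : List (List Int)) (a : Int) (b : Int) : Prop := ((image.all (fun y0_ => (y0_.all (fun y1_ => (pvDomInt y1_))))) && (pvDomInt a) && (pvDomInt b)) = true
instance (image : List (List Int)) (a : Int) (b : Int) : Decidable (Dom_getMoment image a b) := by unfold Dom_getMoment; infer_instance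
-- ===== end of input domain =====

-- B replaces A's H*W double loop by two O(H+W) coordinate sums combined in closed form
-- (the grey values are never read by either program); equality of the return values is proved on Pre_.

-- ===== PORT A =====
-- yi**b / xi**a are ported as `yi ^ b.toNat`: exact for the nonnegative exponents Pre_ admits
-- (Python raises ZeroDivisionError / leaves int on negative exponents; those inputs are outside Pre_).
-- image[0] is only reached when the outer loop runs, i.e. image ≠ []; pyGetD's default is then never used.
def getMoment (image : List (List Int)) (a : Int) (b : Int) : Int :=
  (PySem.List.pyRange 0 image.length 1).foldl (fun result yi =>
    (PySem.List.pyRange 0 (PySem.List.pyGetD image 0 []).length 1).foldl (fun result xi =>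
      let thisVal := yi ^ b.toNat + xi ^ a.toNat
      if thisVal > 0 then result + thisVal else result) result) 0

-- ===== PORT B =====
def getMoment_alt (image : List (List Int)) (a : Int) (b : Int) : Int :=
  let h : Int := image.length
  let w : Int := if image = [] then 0 else ((PySem.List.pyGetD image 0 []).length : Int)
  if h = 0 ∨ w = 0 then 0
  else
    w * ((PySem.List.pyRange 0 h 1).map (fun y => y ^ b.toNat)).sum
      + h * ((PySem.List.pyRange 0 w 1).map (fun x => x ^ a.toNat)).sum

-- ===== PRECONDITION & SPEC =====
-- Pre_ admits exactly the inputs on which Python A returns: whenever the pixel grid is nonempty in both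
-- dimensions and an exponent is negative, A's first iteration evaluates 0**negative and raises
-- ZeroDivisionError (B raises there too); a zero-height or zero-width grid never evaluates a power.
def Pre_getMoment (image : List (List Int)) (a : Int) (b : Int) : Prop :=
  image = [] ∨ (image.headD []) = [] ∨ (0 ≤ a ∧ 0 ≤ b)
instance (image : List (List Int)) (a : Int) (b : Int) : Decidable (Pre_getMoment image a b) := by
  unfold Pre_getMoment; infer_instance
def pvWitness_getMoment : List (List Int) × Int × Int := ([[1, 2], [3, 4], [5, 6]], 2, 3)
def Spec_getMoment (image : List (List Int)) (a : Int) (b : Int) (out : Int) : Prop := out = getMoment_alt image a b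
instance (image : List (List Int)) (a : Int) (b : Int) (out : Int) : Decidable (Spec_getMoment image a b out) := by unfold Spec_getMoment; infer_instance

-- ===== CLAIM (what is proved, stated in full; the proofs are below) =====
def Claim_equal_getMoment : Prop := ∀ (image : List (List Int)) (a : Int) (b : Int), Dom_getMoment image a b → Pre_getMoment image a b → Spec_getMoment image a b (getMoment image a b)

-- ===== LEMMAS AND PROOFS =====

-- A's inner loop adds a term only when it is positive; when every term is nonnegative this
-- is just adding all of them.
theorem foldl_if_pos_sum (f : Int → Int) :
    ∀ (L : List Int) (r : Int), (∀ x ∈ L, 0 ≤ f x) →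
      L.foldl (fun r x => if f x > 0 then r + f x else r) r = r + (L.map f).sum := by
  intro L
  induction L with
  | nil => intro r _; simp
  | cons x xs ih =>
    intro r h
    have hx : 0 ≤ f x := h x (List.mem_cons_self)
    simp only [List.foldl_cons, List.map_cons, List.sum_cons]
    rcases lt_or_eq_of_le hx with hpos | hzero
    · rw [if_pos hpos, ih (r + f x) (fun y hy => h y (List.mem_cons_of_mem _ hy))]
      ring
    · rw [if_neg (by omega), ih r (fun y hy => h y (List.mem_cons_of_mem _ hy)), ← hzero]
      ring

theorem sum_map_const_add (c : Int) (p : Int → Int) :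
    ∀ (L : List Int), (L.map (fun x => c + p x)).sum = (L.length : Int) * c + (L.map p).sum := by
  intro L
  induction L with
  | nil => simp
  | cons x xs ih => simp [ih]; ring

theorem getMoment_spec_aux (image : List (List Int)) (a b : Int) :
    getMoment image a b = getMoment_alt image a b := by
  unfold getMoment getMoment_alt
  rcases eq_or_ne image [] with hnil | hne
  · subst hnil; simp
  have hH : (0 : Int) < image.length := by
    have := List.length_pos_of_ne_nil hne
    exact_mod_cast this
  simp only [if_neg hne]
  set W : Int := ((PySem.List.pyGetD image 0 []).length : Int) with hW
  have hW0 : 0 ≤ W := by positivity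
  rcases eq_or_lt_of_le hW0 with hWz | hWpos
  · -- zero-width grid: the inner loop is empty, both sides are 0
    rw [if_pos (Or.inr hWz.symm)]
    rw [PySem.List.pyRange_one_eq_nil (by omega : W ≤ 0)]
    simp
  · rw [if_neg (by omega)]
    -- rewrite A's inner loop as an unconditional sum, for each yi of the outer range
    have hcongr :
        (PySem.List.pyRange 0 (image.length : Int) 1).foldl (fun result yi =>
            (PySem.List.pyRange 0 W 1).foldl (fun result xi =>
              if yi ^ b.toNat + xi ^ a.toNat > 0 then result + (yi ^ b.toNat + xi ^ a.toNat)
              else result) result) 0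
          = (PySem.List.pyRange 0 (image.length : Int) 1).foldl (fun result yi => result +
              ((PySem.List.pyRange 0 W 1).map (fun xi => yi ^ b.toNat + xi ^ a.toNat)).sum) 0 :=
      PySem.List.foldl_congr_mem _ _ _ _ (by
        intro acc yi hyi
        have hy : 0 ≤ yi := (PySem.List.mem_pyRange_one.mp hyi).1
        exact foldl_if_pos_sum (fun xi => yi ^ b.toNat + xi ^ a.toNat) _ acc
          (fun x hx => by
            have hx0 : 0 ≤ x := (PySem.List.mem_pyRange_one.mp hx).1
            positivity))
    rw [hcongr, PySem.List.foldl_add]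
    -- evaluate both sums in closed form
    have hlenW : (((PySem.List.pyRange 0 W 1).length : Int)) = W := by
      rw [PySem.List.length_pyRange_one]; omega
    have hlenH : (((PySem.List.pyRange 0 (image.length : Int) 1).length : Int)) = (image.length : Int) := by
      rw [PySem.List.length_pyRange_one]; omega
    have hinner : ∀ yi : Int,
        ((PySem.List.pyRange 0 W 1).map (fun xi => yi ^ b.toNat + xi ^ a.toNat)).sum
          = W * yi ^ b.toNat + ((PySem.List.pyRange 0 W 1).map (fun x => x ^ a.toNat)).sum := by
      intro yi
      rw [sum_map_const_add (yi ^ b.toNat) (fun x => x ^ a.toNat), hlenW]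
    calc (0 : Int) + ((PySem.List.pyRange 0 (image.length : Int) 1).map
            (fun yi => ((PySem.List.pyRange 0 W 1).map (fun xi => yi ^ b.toNat + xi ^ a.toNat)).sum)).sum
        = ((PySem.List.pyRange 0 (image.length : Int) 1).map
            (fun yi => W * yi ^ b.toNat
              + ((PySem.List.pyRange 0 W 1).map (fun x => x ^ a.toNat)).sum)).sum := by
          simp only [zero_add]
          exact congrArg List.sum (List.map_congr_left (fun yi _ => hinner yi))
      _ = W * ((PySem.List.pyRange 0 (image.length : Int) 1).map (fun y => y ^ b.toNat)).sum
            + (image.length : Int) * ((PySem.List.pyRange 0 W 1).map (fun x => x ^ a.toNat)).sum := by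
          rw [show (fun yi : Int => W * yi ^ b.toNat
                + ((PySem.List.pyRange 0 W 1).map (fun x => x ^ a.toNat)).sum)
              = fun yi : Int =>
                  ((PySem.List.pyRange 0 W 1).map (fun x => x ^ a.toNat)).sum
                    + (fun y : Int => W * y ^ b.toNat) yi from by funext yi; ring]
          rw [sum_map_const_add, hlenH]
          rw [show ((PySem.List.pyRange 0 (image.length : Int) 1).map
                (fun y : Int => W * y ^ b.toNat)).sum
              = W * ((PySem.List.pyRange 0 (image.length : Int) 1).map (fun y => y ^ b.toNat)).sum from by
            rw [← List.sum_map_mul_left]]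
          ring

-- ===== VERDICT (by name: the statement is the Claim_ definition above) =====
theorem getMoment_spec : Claim_equal_getMoment := by
  intro image a b _ _
  unfold Spec_getMoment
  exact getMoment_spec_aux image a b
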